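-- pv_equiv track=rewrite | github.com/Flower2103/Lenguajes_Automatas_I | p1.5/main.py | token_date
-- ===== SOURCE A (Python) =====
-- def token_date(array):
--     tokens = []
--     buffer = [] # Almacenar digitos de la fecha
--
--     for token, _ in array:
--         if token in [45, 48, 49, 50, 51, 52, 53, 54, 55, 56, 57]:  # Dígitos y guión
--             buffer.append(token)
--         else:
--             if len(buffer) == 10 and buffer[4] == 45 and buffer[7] == 45: # 10 datos de la fecha e índice del guión
--                 if all(48 <= buffer[i] <= 57 for i in [0, 1, 2, 3, 5, 6, 8, 9]): # Digitos en los índices correctos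
--                     tokens.append(888)  # Token para fecha
--                     buffer = []
--                 else:
--                     tokens.extend(buffer)
--                     buffer = []
--             else:
--                 tokens.extend(buffer)
--                 buffer = []
--             tokens.append(token)
--     # Verifica si el buffer contiene una fecha al final del array
--     if len(buffer) == 10 and buffer[4] == 45 and buffer[7] == 45:
--         if all(48 <= buffer[i] <= 57 for i in [0, 1, 2, 3, 5, 6, 8, 9]):
--             tokens.append(888)  # Token para fecha si termina en una fecha
--         else:
--             tokens.extend(buffer)
--     else:
--         tokens.extend(buffer)
--
--     return tokens
-- ===== SOURCE B (Python) =====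
-- def token_date(array):
--     toks = [t for t, _ in array]
--     tokens = []
--     i, n = 0, len(toks)
--     while i < n:
--         t = toks[i]
--         if t == 45 or 48 <= t <= 57:
--             j = i
--             while j < n and (toks[j] == 45 or 48 <= toks[j] <= 57):
--                 j += 1
--             run = toks[i:j]
--             if len(run) == 10 and run[4] == 45 and run[7] == 45 and \
--                all(48 <= run[k] <= 57 for k in (0, 1, 2, 3, 5, 6, 8, 9)):
--                 tokens.append(888)
--             else:
--                 tokens.extend(run)
--             i = j
--         else:
--             tokens.append(t)
--             i += 1
--     return tokens
-- ===== Notes on version B (the rewrite author's own statement) =====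
-- stated objective: simpler
-- what changed: Replaces A's running buffer with flush logic duplicated at each non-member token and again after the loop by a single segment-classification pass: scan maximal digit/hyphen runs and classify each run once.
import Mathlib
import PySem

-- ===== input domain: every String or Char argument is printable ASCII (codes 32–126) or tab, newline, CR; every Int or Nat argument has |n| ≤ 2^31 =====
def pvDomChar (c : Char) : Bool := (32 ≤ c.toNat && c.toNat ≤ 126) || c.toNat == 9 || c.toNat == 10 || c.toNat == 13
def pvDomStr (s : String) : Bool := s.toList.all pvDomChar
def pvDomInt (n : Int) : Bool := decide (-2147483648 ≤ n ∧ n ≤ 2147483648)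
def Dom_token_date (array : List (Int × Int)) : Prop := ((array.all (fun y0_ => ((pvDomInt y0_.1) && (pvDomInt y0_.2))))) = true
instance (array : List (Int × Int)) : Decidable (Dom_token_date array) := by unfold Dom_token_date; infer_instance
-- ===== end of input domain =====

-- B replaces A's running buffer + duplicated trailing flush by one segment-classification
-- pass over maximal digit/hyphen runs (objective: simpler decomposition).

-- ===== PORT A =====
-- digits at indices 0,1,2,3,5,6,8,9 (the 'all(...)' generator of A)
def pvAllDigitsA (buffer : List Int) : Bool :=
  ([0, 1, 2, 3, 5, 6, 8, 9] : List Nat).all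
    (fun i => decide (48 ≤ buffer.getD i 0 ∧ buffer.getD i 0 ≤ 57))

-- 'tokens.extend/append' of A's flush of the buffer (nested ifs as in A)
def pvFlushA (tokens buffer : List Int) : List Int :=
  if buffer.length = 10 ∧ buffer.getD 4 0 = 45 ∧ buffer.getD 7 0 = 45 then
    if pvAllDigitsA buffer then tokens ++ [888] else tokens ++ buffer
  else tokens ++ buffer

def token_date (array : List (Int × Int)) : List Int :=
  let st := array.foldl
    (fun (st : List Int × List Int) p =>
      let token := p.1
      if ([45, 48, 49, 50, 51, 52, 53, 54, 55, 56, 57] : List Int).contains token then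
        (st.1, st.2 ++ [token])
      else
        (pvFlushA st.1 st.2 ++ [token], []))
    ([], [])
  pvFlushA st.1 st.2

-- ===== PORT B =====
def pvDateable (t : Int) : Bool := t == 45 || (decide (48 ≤ t) && decide (t ≤ 57))

-- classify one maximal digit/hyphen run (B's single conjunction test)
def pvRunOut (run : List Int) : List Int :=
  if run.length = 10 ∧ run.getD 4 0 = 45 ∧ run.getD 7 0 = 45 ∧
     (([0, 1, 2, 3, 5, 6, 8, 9] : List Nat).all
       (fun k => decide (48 ≤ run.getD k 0 ∧ run.getD k 0 ≤ 57))) = true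
  then [888] else run

-- B's index scan over toks: emit the maximal dateable run starting at i (classified),
-- else emit the single token; structural recursion via takeWhile/dropWhile
def pvGoB : List Int → List Int
  | [] => []
  | t :: ts =>
    if pvDateable t then
      pvRunOut (t :: ts.takeWhile pvDateable) ++ pvGoB (ts.dropWhile pvDateable)
    else
      t :: pvGoB ts
termination_by l => l.length
decreasing_by
  · exact Nat.lt_succ_of_le (List.length_dropWhile_le _ _)
  · simp

def token_date_alt (array : List (Int × Int)) : List Int :=
  pvGoB (array.map (fun p => p.1))

-- ===== PRECONDITION & SPEC =====
def Spec_token_date (array : List (Int × Int)) (out : List Int) : Prop := out = token_date_alt array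
instance (array : List (Int × Int)) (out : List Int) : Decidable (Spec_token_date array out) := by unfold Spec_token_date; infer_instance

-- ===== CLAIM (what is proved, stated in full; the proofs are below) =====
def Claim_equal_token_date : Prop := ∀ (array : List (Int × Int)), Dom_token_date array → Spec_token_date array (token_date array)

-- ===== LEMMAS AND PROOFS =====

-- A's fold step, with the membership test already resolved to B's predicate
def pvStep (st : List Int × List Int) (p : Int × Int) : List Int × List Int :=
  if pvDateable p.1 then (st.1, st.2 ++ [p.1]) else (pvFlushA st.1 st.2 ++ [p.1], [])

-- the membership test of A coincides with B's predicate
theorem pv_mem_eq (t : Int) :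
    ([45, 48, 49, 50, 51, 52, 53, 54, 55, 56, 57] : List Int).contains t = pvDateable t := by
  rw [Bool.eq_iff_iff]
  simp only [pvDateable, List.contains_eq_mem, List.mem_cons, List.not_mem_nil, or_false,
    decide_eq_true_eq, Bool.or_eq_true, Bool.and_eq_true, beq_iff_eq]
  omega

theorem pv_step_eq :
    (fun (st : List Int × List Int) (p : Int × Int) =>
      let token := p.1
      if ([45, 48, 49, 50, 51, 52, 53, 54, 55, 56, 57] : List Int).contains token then
        (st.1, st.2 ++ [token])
      else
        (pvFlushA st.1 st.2 ++ [token], [])) = pvStep := by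
  funext st p
  simp only [pv_mem_eq]
  rfl

-- A's flush equals appending B's run classification
theorem pv_flush_eq (tokens buffer : List Int) :
    pvFlushA tokens buffer = tokens ++ pvRunOut buffer := by
  unfold pvFlushA pvRunOut pvAllDigitsA
  by_cases h1 : buffer.length = 10 ∧ buffer.getD 4 0 = 45 ∧ buffer.getD 7 0 = 45
  · by_cases h2 : (([0, 1, 2, 3, 5, 6, 8, 9] : List Nat).all
        (fun i => decide (48 ≤ buffer.getD i 0 ∧ buffer.getD i 0 ≤ 57))) = true
    · rw [if_pos h1, if_pos h2, if_pos ⟨h1.1, h1.2.1, h1.2.2, h2⟩]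
    · rw [if_pos h1, if_neg h2, if_neg (fun hc => h2 hc.2.2.2)]
  · rw [if_neg h1, if_neg (fun hc => h1 ⟨hc.1, hc.2.1, hc.2.2.1⟩)]

theorem pv_runOut_nil : pvRunOut [] = [] := by decide

-- go absorbs a leading (possibly empty) dateable run
theorem pv_go_run (ts : List Int) :
    pvGoB ts = pvRunOut (ts.takeWhile pvDateable) ++ pvGoB (ts.dropWhile pvDateable) := by
  cases ts with
  | nil => simp [pvGoB, pv_runOut_nil]
  | cons t ts =>
    by_cases h : pvDateable t
    · simp [pvGoB, h, List.takeWhile_cons, List.dropWhile_cons]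
    · simp [List.takeWhile_cons, List.dropWhile_cons, h, pv_runOut_nil]

-- main loop invariant: flushing the fold's final state = emitted prefix + run decomposition
theorem pv_loop (l : List (Int × Int)) (tokens buffer : List Int) :
    pvFlushA (l.foldl pvStep (tokens, buffer)).1 (l.foldl pvStep (tokens, buffer)).2
    = tokens ++ pvRunOut (buffer ++ (l.map (fun p => p.1)).takeWhile pvDateable)
        ++ pvGoB ((l.map (fun p => p.1)).dropWhile pvDateable) := by
  induction l generalizing tokens buffer with
  | nil => simp [pvGoB, pv_flush_eq]
  | cons p rest ih =>
    rw [List.foldl_cons]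
    by_cases h : pvDateable p.1
    · have hstep : pvStep (tokens, buffer) p = (tokens, buffer ++ [p.1]) := by
        simp [pvStep, h]
      rw [hstep, ih]
      simp [h, List.takeWhile_cons, List.dropWhile_cons, List.append_assoc]
    · have hstep : pvStep (tokens, buffer) p = (pvFlushA tokens buffer ++ [p.1], []) := by
        simp [pvStep, h]
      rw [hstep, ih]
      have hgo : pvGoB (p.1 :: rest.map (fun p => p.1))
          = p.1 :: pvGoB (rest.map (fun p => p.1)) := by
        simp [pvGoB, h]
      simp only [List.map_cons, List.takeWhile_cons, List.dropWhile_cons, h,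
        Bool.false_eq_true, if_false, List.append_nil, List.nil_append, hgo]
      rw [pv_go_run (rest.map (fun p => p.1))]
      simp [pv_flush_eq, List.append_assoc]

-- ===== VERDICT (by name: the statement is the Claim_ definition above) =====
theorem token_date_spec : Claim_equal_token_date := by
  intro array _
  unfold Spec_token_date token_date token_date_alt
  rw [pv_step_eq]
  have h := pv_loop array [] []
  simp only [List.nil_append] at h
  rw [h]
  exact (pv_go_run _).symm
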